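-- pv_equiv track=rewrite | github.com/sgiorgis/MixMatch-Pytorch | semi_supervised/mix_up.py | interleave_offsets
-- ===== SOURCE A (Python) =====
-- def interleave_offsets(batch, nu):
-- 	groups = [batch // (nu + 1)] * (nu + 1)
-- 	for x in range(batch - sum(groups)):
-- 		groups[-x -1] +=1
-- 	offsets = [0]
-- 	for g in groups:
-- 		offsets.append(offsets[-1] + g)
-- 	return offsets
-- ===== SOURCE B (Python) =====
-- def interleave_offsets(batch, nu):
--     base = batch // (nu + 1)
--     r = batch % (nu + 1)
--     cut = (nu + 1) - r
--     return [i * base + max(0, i - cut) for i in range(nu + 2)]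
-- ===== Notes on version B (the rewrite author's own statement) =====
-- stated objective: simpler
-- what changed: Replaces A's groups list, remainder-distribution loop and running-sum accumulator with a single closed-form comprehension offsets[i] = i*base + max(0, i - ((nu+1)-r)).
-- outside the precondition, e.g. on interleave_offsets(0, -2): A returns [0], B returns []; on interleave_offsets(-3, -5): A returns [0], B returns []
import Mathlib
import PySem

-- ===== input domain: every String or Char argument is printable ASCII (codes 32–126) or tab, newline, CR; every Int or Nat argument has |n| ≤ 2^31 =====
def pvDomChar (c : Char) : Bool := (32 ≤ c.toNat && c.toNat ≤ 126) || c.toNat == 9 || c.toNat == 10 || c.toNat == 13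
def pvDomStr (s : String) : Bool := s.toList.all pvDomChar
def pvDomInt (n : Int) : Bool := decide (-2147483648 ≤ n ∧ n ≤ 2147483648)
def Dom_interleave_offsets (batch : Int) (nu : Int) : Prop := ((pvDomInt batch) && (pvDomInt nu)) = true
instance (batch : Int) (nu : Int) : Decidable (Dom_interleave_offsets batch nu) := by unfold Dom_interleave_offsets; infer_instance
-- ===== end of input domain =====

-- B replaces A's groups list, remainder-distribution loop and running-sum accumulator
-- with one closed-form comprehension offsets[i] = i*base + max(0, i-((nu+1)-r)) (objective: simpler).


-- ===== PORT A =====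
-- groups[-x-1] += 1 : read and set at Python index -x-1, i.e. Nat index len-x-1 (exact inside
-- Pre_, where 0 ≤ x < len throughout the loop)
def pvStep (g : List Int) (x : Int) : List Int :=
  g.set ((g.length : Int) - x - 1).toNat (g.getD ((g.length : Int) - x - 1).toNat 0 + 1)

def interleave_offsets (batch : Int) (nu : Int) : List Int :=
  let groups := List.replicate (nu + 1).toNat (PySem.Int.floordiv batch (nu + 1))
  let groups := (PySem.List.pyRange 0 (batch - groups.sum) 1).foldl pvStep groups
  groups.foldl (fun offs g => offs ++ [offs.getLastD 0 + g]) [0]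

-- ===== PORT B =====
def interleave_offsets_alt (batch : Int) (nu : Int) : List Int :=
  let base := PySem.Int.floordiv batch (nu + 1)
  let r := PySem.Int.mod batch (nu + 1)
  let cut := (nu + 1) - r
  (PySem.List.pyRange 0 (nu + 2) 1).map (fun i => i * base + max 0 (i - cut))

-- ===== PRECONDITION & SPEC =====
-- Pre_ excludes nu ≤ -1, where the group count nu+1 is not positive: A raises ZeroDivisionError at
-- nu = -1 and IndexError for nu < -1 with batch > 0, and for nu < -1 with batch ≤ 0 returns the
-- degenerate [0] of an empty group list while B naturally returns [].
def Pre_interleave_offsets (batch : Int) (nu : Int) : Prop := 0 ≤ nu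
instance (batch : Int) (nu : Int) : Decidable (Pre_interleave_offsets batch nu) := by unfold Pre_interleave_offsets; infer_instance
def pvWitness_interleave_offsets : Int × Int := (11, 3)

def Spec_interleave_offsets (batch : Int) (nu : Int) (out : List Int) : Prop := out = interleave_offsets_alt batch nu
instance (batch : Int) (nu : Int) (out : List Int) : Decidable (Spec_interleave_offsets batch nu out) := by unfold Spec_interleave_offsets; infer_instance

-- ===== CLAIM (what is proved, stated in full; the proofs are below) =====
def Claim_equal_interleave_offsets : Prop := ∀ (batch : Int) (nu : Int), Dom_interleave_offsets batch nu → Pre_interleave_offsets batch nu → Spec_interleave_offsets batch nu (interleave_offsets batch nu)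

-- ===== LEMMAS AND PROOFS =====

-- setting the last element of a replicate
theorem pv_set_replicate_last (j : Nat) (b v : Int) :
    (List.replicate (j + 1) b).set j v = List.replicate j b ++ [v] := by
  induction j with
  | zero => rfl
  | succ j ih =>
      show (b :: List.replicate (j + 1) b).set (j + 1) v = List.replicate (j + 1) b ++ [v]
      rw [List.set_cons_succ, ih, List.replicate_succ, List.cons_append]

-- one step of the remainder-distribution loop
theorem pv_step_eq (m k : Nat) (b : Int) (h : k + 1 ≤ m) :
    pvStep (List.replicate (m - k) b ++ List.replicate k (b + 1)) (k : Int)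
      = List.replicate (m - (k + 1)) b ++ List.replicate (k + 1) (b + 1) := by
  have hlen : (List.replicate (m - k) b ++ List.replicate k (b + 1)).length = m := by
    simp only [List.length_append, List.length_replicate]; omega
  unfold pvStep
  rw [hlen]
  have hi : ((m : Int) - (k : Int) - 1).toNat = m - k - 1 := by omega
  rw [hi]
  have hget : (List.replicate (m - k) b ++ List.replicate k (b + 1)).getD (m - k - 1) 0 = b := by
    rw [List.getD_eq_getElem?_getD,
      List.getElem?_append_left (by simp only [List.length_replicate]; omega),
      List.getElem?_replicate, if_pos (by omega : m - k - 1 < m - k)]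
    rfl
  rw [hget, List.set_append_left _ _ (by simp only [List.length_replicate]; omega)]
  have h1 : m - k = (m - k - 1) + 1 := by omega
  rw [h1, show m - k - 1 + 1 - 1 = m - k - 1 from by omega, pv_set_replicate_last]
  rw [show m - (k + 1) = m - k - 1 from by omega, List.append_assoc,
    show [b + 1] ++ List.replicate k (b + 1) = List.replicate (k + 1) (b + 1) from by
      rw [List.replicate_succ, List.singleton_append]]

-- the remainder-distribution loop over range(k) turns the last k entries of replicate m b into b+1
theorem pv_loop (m k : Nat) (b : Int) (hk : k ≤ m) :
    (PySem.List.pyRange 0 (k : Int) 1).foldl pvStep (List.replicate m b)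
      = List.replicate (m - k) b ++ List.replicate k (b + 1) := by
  induction k with
  | zero => simp
  | succ k ih =>
      have hk' : k ≤ m := Nat.le_of_succ_le hk
      have hcast : ((k + 1 : Nat) : Int) = (k : Int) + 1 := by push_cast; ring
      rw [hcast, PySem.List.pyRange_one_succ_right (by positivity), List.foldl_append, ih hk']
      show pvStep _ _ = _
      exact pv_step_eq m k b hk

-- the cumulative-offsets loop is the list of prefix sums
theorem pv_offsets (gs : List Int) :
    gs.foldl (fun offs g => offs ++ [offs.getLastD 0 + g]) [0]
      = (List.range (gs.length + 1)).map (fun i => (gs.take i).sum) := by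
  induction gs using List.reverseRecOn with
  | nil => simp
  | append_singleton gs g ih =>
      rw [List.foldl_append, ih]
      have hlast : (((List.range (gs.length + 1)).map (fun i => (gs.take i).sum)).getLastD 0)
          = gs.sum := by
        rw [List.range_succ, List.map_append]
        simp
      simp only [List.foldl_cons, List.foldl_nil, hlast]
      rw [List.length_append, List.length_singleton, List.range_succ (n := gs.length + 1),
        List.map_append]
      congr 1
      · apply List.map_congr_left
        intro i hi
        rw [List.mem_range] at hi
        rw [List.take_append_of_le_length (by omega)]
      · simp

-- prefix sums of the two-block group list match B's closed form
theorem pv_blocks_sum (p k j : Nat) (b : Int) (hj : j ≤ p + k) :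
    ((List.replicate p b ++ List.replicate k (b + 1)).take j).sum
      = (j : Int) * b + max 0 ((j : Int) - (p : Int)) := by
  rw [List.take_append, List.take_replicate, List.take_replicate, List.sum_append,
    List.sum_replicate, List.sum_replicate, List.length_replicate]
  rcases le_or_gt j p with h | h
  · have h1 : min j p = j := by omega
    have h2 : j - p = 0 := by omega
    have h3 : max 0 ((j : Int) - (p : Int)) = 0 := by omega
    rw [h1, h2, h3]
    simp
  · have h1 : min j p = p := by omega
    have h2 : min (j - p) k = j - p := by omega
    have h3 : max 0 ((j : Int) - (p : Int)) = (j : Int) - (p : Int) := by omega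
    rw [h1, h2, h3]
    simp only [nsmul_eq_mul]
    have h4 : ((j - p : Nat) : Int) = (j : Int) - (p : Int) := by omega
    rw [h4]
    ring

-- ===== VERDICT (by name: the statement is the Claim_ definition above) =====
theorem interleave_offsets_spec : Claim_equal_interleave_offsets := by
  intro batch nu _ hpre
  unfold Pre_interleave_offsets at hpre
  show interleave_offsets batch nu = interleave_offsets_alt batch nu
  show ((PySem.List.pyRange 0
          (batch - (List.replicate (nu + 1).toNat (PySem.Int.floordiv batch (nu + 1))).sum) 1).foldl
          pvStep (List.replicate (nu + 1).toNat (PySem.Int.floordiv batch (nu + 1)))).foldl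
          (fun offs g => offs ++ [offs.getLastD 0 + g]) [0]
      = (PySem.List.pyRange 0 (nu + 2) 1).map
          (fun i => i * PySem.Int.floordiv batch (nu + 1)
            + max 0 (i - ((nu + 1) - PySem.Int.mod batch (nu + 1))))
  set n : Int := nu + 1 with hn
  have hnpos : 0 < n := by omega
  set b : Int := PySem.Int.floordiv batch n with hb
  set r : Int := PySem.Int.mod batch n with hr
  have hr0 : 0 ≤ r := PySem.Int.mod_nonneg batch hnpos
  have hrn : r < n := PySem.Int.mod_lt batch hnpos
  set m : Nat := n.toNat with hm
  have hmn : (m : Int) = n := by omega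
  set k : Nat := r.toNat with hk
  have hkr : (k : Int) = r := by omega
  have hkm : k ≤ m := by omega
  have hrange : batch - (List.replicate m b).sum = (k : Int) := by
    have hfm := PySem.Int.floordiv_mul_add_mod batch n
    rw [← hb, ← hr] at hfm
    rw [List.sum_replicate, nsmul_eq_mul, hmn, hkr]
    linarith
  rw [hrange, pv_loop m k b hkm, pv_offsets]
  have hlen : (List.replicate (m - k) b ++ List.replicate k (b + 1)).length = m := by
    simp only [List.length_append, List.length_replicate]; omega
  rw [hlen]
  rw [show (nu + 2 : Int) = ((m + 1 : Nat) : Int) by omega, PySem.List.pyRange_zero_natCast,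
    List.map_map]
  apply List.map_congr_left
  intro j hj
  rw [List.mem_range] at hj
  have hjm : j ≤ (m - k) + k := by omega
  rw [pv_blocks_sum (m - k) k j b hjm]
  simp only [Function.comp_apply]
  have hcut : n - r = ((m - k : Nat) : Int) := by omega
  rw [hcut]
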